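-- pv_equiv track=rewrite | github.com/SylvainDe/aoc | python/2022/day9.py | follow
-- ===== SOURCE A (Python) =====
-- def sign(x):
--     if x < 0:
--         return -1
--     if x > 0:
--         return 1
--     return 0
--
-- def follow(head, tail):
--     hx, hy = head
--     tx, ty = tail
--     t_pos = {tail}
--     while abs(hx - tx) > 1 or abs(hy - ty) > 1:
--         tx += sign(hx - tx)
--         ty += sign(hy - ty)
--         t_pos.add((tx, ty))
--     return (tx, ty), t_pos
-- ===== SOURCE B (Python) =====
-- def follow(head, tail):
--     hx, hy = head
--     tx, ty = tail
--     dx = hx - tx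
--     dy = hy - ty
--     adx = abs(dx)
--     ady = abs(dy)
--     sx = (dx > 0) - (dx < 0)
--     sy = (dy > 0) - (dy < 0)
--     n = max(adx, ady) - 1
--     last = (tx, ty)
--     t_pos = {tail}
--     for i in range(1, n + 1):
--         last = (tx + sx * min(i, adx), ty + sy * min(i, ady))
--         t_pos.add(last)
--     return last, t_pos
-- ===== Notes on version B (the rewrite author's own statement) =====
-- stated objective: alternative
-- what changed: Replaces A's stateful while-loop (re-computing signs and the Chebyshev-distance stop condition each step) by an up-front computation of signs and step count n = max(|dx|,|dy|)-1 and a closed-form position formula tx0+sx*min(i,|dx|) indexed over range(1,n+1).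
import Mathlib
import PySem

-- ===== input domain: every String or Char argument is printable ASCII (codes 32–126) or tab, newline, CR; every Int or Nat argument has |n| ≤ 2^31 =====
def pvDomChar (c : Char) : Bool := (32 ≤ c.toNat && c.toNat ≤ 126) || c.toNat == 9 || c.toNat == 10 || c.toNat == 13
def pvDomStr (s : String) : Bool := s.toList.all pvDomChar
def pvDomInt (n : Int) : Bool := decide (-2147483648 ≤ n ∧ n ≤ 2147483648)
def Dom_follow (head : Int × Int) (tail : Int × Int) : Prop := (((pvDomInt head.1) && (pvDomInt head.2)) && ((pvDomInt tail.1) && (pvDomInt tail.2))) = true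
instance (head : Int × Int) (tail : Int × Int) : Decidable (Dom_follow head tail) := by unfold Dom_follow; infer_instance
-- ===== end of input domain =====

-- B replaces A's stateful while-loop by an up-front sign/step-count computation and a
-- closed-form position formula per step index (objective: alternative decomposition).

-- ===== PORT A =====
-- helper 'sign' of the Python module
def signA (x : Int) : Int := if x < 0 then -1 else if x > 0 then 1 else 0

-- the while-loop of A, with a fuel argument that only makes the recursion structural;
-- follow supplies enough fuel for the loop to always reach its exit condition (loop_fuel_enough below)
def followLoop (fuel : Nat) (hx hy tx ty : Int) (s : List (Int × Int)) : (Int × Int) × (List (Int × Int)) :=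
  match fuel with
  | 0 => ((tx, ty), s)
  | Nat.succ f =>
    if (hx - tx).natAbs > 1 ∨ (hy - ty).natAbs > 1 then
      let tx' := tx + signA (hx - tx)
      let ty' := ty + signA (hy - ty)
      followLoop f hx hy tx' ty' (PySem.Set.add s (tx', ty'))
    else ((tx, ty), s)

def follow (head : Int × Int) (tail : Int × Int) : (Int × Int) × (List (Int × Int)) :=
  followLoop ((head.1 - tail.1).natAbs + (head.2 - tail.2).natAbs) head.1 head.2 tail.1 tail.2
    (PySem.Set.add PySem.Set.empty tail)

-- ===== PORT B =====
def follow_alt (head : Int × Int) (tail : Int × Int) : (Int × Int) × (List (Int × Int)) :=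
  let hx := head.1
  let hy := head.2
  let tx := tail.1
  let ty := tail.2
  let dx := hx - tx
  let dy := hy - ty
  let adx : Int := |dx|
  let ady : Int := |dy|
  let sx : Int := (if 0 < dx then 1 else 0) - (if dx < 0 then 1 else 0)
  let sy : Int := (if 0 < dy then 1 else 0) - (if dy < 0 then 1 else 0)
  let n : Int := max adx ady - 1
  (PySem.List.pyRange 1 (n + 1) 1).foldl
    (fun st i =>
      let p := (tx + sx * min i adx, ty + sy * min i ady)
      (p, PySem.Set.add st.2 p))
    ((tx, ty), PySem.Set.add PySem.Set.empty tail)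

-- ===== PRECONDITION & SPEC =====
def Spec_follow (head : Int × Int) (tail : Int × Int) (out : (Int × Int) × (List (Int × Int))) : Prop := out = follow_alt head tail
instance (head : Int × Int) (tail : Int × Int) (out : (Int × Int) × (List (Int × Int))) : Decidable (Spec_follow head tail out) := by unfold Spec_follow; infer_instance

-- ===== CLAIM (what is proved, stated in full; the proofs are below) =====
def Claim_equal_follow : Prop := ∀ (head : Int × Int) (tail : Int × Int), Dom_follow head tail → Spec_follow head tail (follow head tail)

-- ===== LEMMAS AND PROOFS =====

-- B's inline sign expression equals the module's sign function times min 1 |x| (the very first step)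
lemma sgn_first (x : Int) :
    ((if 0 < x then (1:Int) else 0) - (if x < 0 then 1 else 0)) * min 1 |x| = signA x := by
  simp only [signA, Int.abs_eq_natAbs]
  split_ifs <;> omega

-- shifting the step index by one against moving the origin one step toward the head
lemma sgn_shift (d i : Int) (hi : 1 ≤ i) :
    ((if 0 < d then (1:Int) else 0) - (if d < 0 then 1 else 0)) * min (i + 1) |d| =
    signA d + ((if 0 < (d - signA d) then (1:Int) else 0) - (if (d - signA d) < 0 then 1 else 0)) * min i |d - signA d| := by
  simp only [signA, Int.abs_eq_natAbs]
  split_ifs <;> omega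

-- the loop of A equals B's indexed closed-form fold, given enough fuel
lemma loop_eq : ∀ (fuel m : Nat) (hx hy tx ty : Int) (s : List (Int × Int)),
    (hx - tx).natAbs ⊔ (hy - ty).natAbs = m → m - 1 ≤ fuel →
    followLoop fuel hx hy tx ty s =
      ((List.range (m - 1)).map (fun (k : Nat) => (1:Int) + (k : Int))).foldl
        (fun st i =>
          let p := (tx + ((if 0 < hx - tx then (1:Int) else 0) - (if hx - tx < 0 then 1 else 0)) * min i |hx - tx|,
                    ty + ((if 0 < hy - ty then (1:Int) else 0) - (if hy - ty < 0 then 1 else 0)) * min i |hy - ty|)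
          (p, PySem.Set.add st.2 p))
        ((tx, ty), s) := by
  intro fuel
  induction fuel with
  | zero =>
    intro m hx hy tx ty s hm hf
    have : m - 1 = 0 := by omega
    rw [this]
    simp [followLoop]
  | succ f ih =>
    intro m hx hy tx ty s hm hf
    by_cases hc : (hx - tx).natAbs > 1 ∨ (hy - ty).natAbs > 1
    · -- loop runs at least once; m ≥ 2
      have hm2 : 2 ≤ m := by omega
      rw [followLoop]
      simp only [hc, if_true]
      have hmeas : (hx - (tx + signA (hx - tx))).natAbs ⊔ (hy - (ty + signA (hy - ty))).natAbs = m - 1 := by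
        simp only [signA]; split_ifs <;> omega
      rw [ih (m - 1) hx hy _ _ _ hmeas (by omega)]
      have hsub : m - 1 - 1 = m - 2 := by omega
      rw [hsub]
      have h1 : List.range (m - 1) = 0 :: List.map Nat.succ (List.range (m - 2)) := by
        rw [show m - 1 = (m - 2) + 1 by omega, List.range_succ_eq_map]
      conv_rhs => rw [h1]
      rw [List.map_cons, List.map_map, List.foldl_cons]
      dsimp only
      simp only [Nat.cast_zero, add_zero]
      rw [sgn_first (hx - tx), sgn_first (hy - ty)]
      rw [List.foldl_map, List.foldl_map]
      congr 1
      funext st k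
      dsimp only [Function.comp]
      have hk : (1:Int) ≤ 1 + (k : Int) := by omega
      have hdx : hx - (tx + signA (hx - tx)) = (hx - tx) - signA (hx - tx) := by ring
      have hdy : hy - (ty + signA (hy - ty)) = (hy - ty) - signA (hy - ty) := by ring
      rw [hdx, hdy]
      have hidx : (1:Int) + ((Nat.succ k : Nat) : Int) = (1 + (k:Int)) + 1 := by
        push_cast; ring
      rw [hidx, sgn_shift (hx - tx) (1 + (k : Int)) hk, sgn_shift (hy - ty) (1 + (k : Int)) hk]
      simp only [add_assoc]
    · -- loop exits immediately; m ≤ 1, so the range is empty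
      rw [followLoop]
      simp only [hc, if_false]
      have : m - 1 = 0 := by omega
      rw [this]
      simp

-- ===== VERDICT (by name: the statement is the Claim_ definition above) =====
theorem follow_spec : Claim_equal_follow := by
  intro head tail _
  unfold Spec_follow follow follow_alt
  dsimp only
  rw [loop_eq ((head.1 - tail.1).natAbs + (head.2 - tail.2).natAbs) ((head.1 - tail.1).natAbs ⊔ (head.2 - tail.2).natAbs) head.1 head.2 tail.1 tail.2 _ rfl (by omega)]
  rw [PySem.List.pyRange_one]
  have : (max |head.1 - tail.1| |head.2 - tail.2| - 1 + 1 - 1).toNat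
      = (head.1 - tail.1).natAbs ⊔ (head.2 - tail.2).natAbs - 1 := by
    simp only [Int.abs_eq_natAbs]; omega
  rw [this]
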